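-- pv_equiv track=rewrite | github.com/Mansi-2024/SRS-Generator | backend/app.py | _infer_interfaces
-- ===== SOURCE A (Python) =====
-- def _req_text(req: dict) -> str:
--     """
--     Extract the requirement text string from a requirement dict.
--     Handles key variants from different pipeline stages:
--       - 'text'        (from requirement_refiner)
--       - 'sentence'    (from analyzer)
--       - 'description' (from older fallback dicts)
--     """
--     return (
--         req.get("text") or
--         req.get("sentence") or
--         req.get("description") or
--         ""
--     )
--
-- def _infer_interfaces(frs: list, nfrs: list, project: str) -> dict:
--     """
--     Generate §3 External Interface descriptions based on requirement keywords.
--     """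
--     all_text = " ".join(_req_text(r).lower() for r in frs + nfrs)
--     ifaces = {}
--
--     # User Interfaces
--     ui_desc = (
--         f"The {project} system shall provide a responsive graphical user interface "
--         f"accessible via web browser. Interfaces include navigation, data entry forms, "
--         f"and feedback dialogs. Designs shall follow WCAG 2.1 AA "
--         f"accessibility guidelines."
--     )
--     ifaces["ui"] = ui_desc
--
--     # Hardware
--     hw_desc = (
--         "Client hardware requires a device capable of running a modern web browser with "
--         "minimum 2 GB RAM. Server hardware shall support the expected concurrent user load "
--         "as defined in §5.1."
--     )
--     ifaces["hw"] = hw_desc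
--
--     # Software
--     sw_parts = [f"The {project} system interacts with the following software components:"]
--     if any(k in all_text for k in ["database", "db", "sql", "store", "record"]):
--         sw_parts.append("• Database engine (e.g., PostgreSQL, MySQL, or MongoDB) for persistent storage.")
--     if any(k in all_text for k in ["email", "smtp", "notification", "alert"]):
--         sw_parts.append("• Email service provider (e.g., SendGrid, AWS SES) for outbound notifications.")
--     if any(k in all_text for k in ["api", "rest", "integration", "third-party", "external"]):
--         sw_parts.append("• External REST APIs for third-party data or service integration.")
--     if any(k in all_text for k in ["payment", "billing", "transaction"]):
--         sw_parts.append("• Payment gateway (e.g., Stripe, PayPal) for financial transactions.")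
--     if len(sw_parts) == 1:
--         sw_parts.append("• Standard OS libraries and runtime environment.")
--     ifaces["sw"] = "\n    ".join(sw_parts)
--
--     # Communications
--     comm_parts = ["Communication protocols and standards:"]
--     comm_parts.append("• HTTPS / TLS 1.2+ for all client-server data transfer.")
--     if any(k in all_text for k in ["api", "rest", "json", "xml", "webhook"]):
--         comm_parts.append("• RESTful JSON APIs for service-to-service communication.")
--     if any(k in all_text for k in ["real-time", "websocket", "live", "push", "streaming"]):
--         comm_parts.append("• WebSocket connections for real-time data streaming.")
--     if any(k in all_text for k in ["email", "smtp", "notification"]):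
--         comm_parts.append("• SMTP for transactional email delivery.")
--     ifaces["comm"] = "\n    ".join(comm_parts)
--
--     return ifaces
-- ===== SOURCE B (Python) =====
-- # B: inverted index — one pass over a flat keyword->tag table collects the matched
-- # tags; each section is then decoded from the tag list (vs A's per-rule if-cascade).
--
-- def _req_text(req: dict) -> str:
--     return (
--         req.get("text") or
--         req.get("sentence") or
--         req.get("description") or
--         ""
--     )
--
-- # Inverted index: each keyword maps to the tag(s) of the rule(s) it can trigger.
-- _KEYWORD_TAGS = [
--     ("database", ["db"]), ("db", ["db"]), ("sql", ["db"]), ("store", ["db"]), ("record", ["db"]),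
--     ("email", ["mail", "smtp"]), ("smtp", ["mail", "smtp"]), ("notification", ["mail", "smtp"]),
--     ("alert", ["mail"]),
--     ("api", ["ext", "json"]), ("rest", ["ext", "json"]),
--     ("integration", ["ext"]), ("third-party", ["ext"]), ("external", ["ext"]),
--     ("payment", ["pay"]), ("billing", ["pay"]), ("transaction", ["pay"]),
--     ("json", ["json"]), ("xml", ["json"]), ("webhook", ["json"]),
--     ("real-time", ["ws"]), ("websocket", ["ws"]), ("live", ["ws"]), ("push", ["ws"]), ("streaming", ["ws"]),
-- ]
--
-- _SW_LINES = [
--     ("db", "• Database engine (e.g., PostgreSQL, MySQL, or MongoDB) for persistent storage."),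
--     ("mail", "• Email service provider (e.g., SendGrid, AWS SES) for outbound notifications."),
--     ("ext", "• External REST APIs for third-party data or service integration."),
--     ("pay", "• Payment gateway (e.g., Stripe, PayPal) for financial transactions."),
-- ]
--
-- _COMM_LINES = [
--     ("json", "• RESTful JSON APIs for service-to-service communication."),
--     ("ws", "• WebSocket connections for real-time data streaming."),
--     ("smtp", "• SMTP for transactional email delivery."),
-- ]
--
-- def _infer_interfaces(frs: list, nfrs: list, project: str) -> dict:
--     all_text = " ".join(_req_text(r).lower() for r in frs + nfrs)
--     # single pass over the inverted index: which tags are triggered by the text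
--     tags = [t for kw, ts in _KEYWORD_TAGS if kw in all_text for t in ts]
--     sw_lines = [line for t, line in _SW_LINES if t in tags] \
--         or ["• Standard OS libraries and runtime environment."]
--     return {
--         "ui": (
--             f"The {project} system shall provide a responsive graphical user interface "
--             f"accessible via web browser. Interfaces include navigation, data entry forms, "
--             f"and feedback dialogs. Designs shall follow WCAG 2.1 AA "
--             f"accessibility guidelines."
--         ),
--         "hw": (
--             "Client hardware requires a device capable of running a modern web browser with "
--             "minimum 2 GB RAM. Server hardware shall support the expected concurrent user load "
--             "as defined in §5.1."
--         ),
--         "sw": "\n    ".join(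
--             [f"The {project} system interacts with the following software components:"] + sw_lines
--         ),
--         "comm": "\n    ".join(
--             ["Communication protocols and standards:",
--              "• HTTPS / TLS 1.2+ for all client-server data transfer."]
--             + [line for t, line in _COMM_LINES if t in tags]
--         ),
--     }
-- ===== Notes on version B (the rewrite author's own statement) =====
-- stated objective: alternative
-- what changed: A's four/three hardcoded per-rule any-keyword-in-text if-blocks are replaced by an inverted keyword->tag index scanned in one pass to collect the matched tag list, from which each section's lines (and the OS-libraries fallback, via an empty-selection test instead of len==1) are decoded.
import Mathlib
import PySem

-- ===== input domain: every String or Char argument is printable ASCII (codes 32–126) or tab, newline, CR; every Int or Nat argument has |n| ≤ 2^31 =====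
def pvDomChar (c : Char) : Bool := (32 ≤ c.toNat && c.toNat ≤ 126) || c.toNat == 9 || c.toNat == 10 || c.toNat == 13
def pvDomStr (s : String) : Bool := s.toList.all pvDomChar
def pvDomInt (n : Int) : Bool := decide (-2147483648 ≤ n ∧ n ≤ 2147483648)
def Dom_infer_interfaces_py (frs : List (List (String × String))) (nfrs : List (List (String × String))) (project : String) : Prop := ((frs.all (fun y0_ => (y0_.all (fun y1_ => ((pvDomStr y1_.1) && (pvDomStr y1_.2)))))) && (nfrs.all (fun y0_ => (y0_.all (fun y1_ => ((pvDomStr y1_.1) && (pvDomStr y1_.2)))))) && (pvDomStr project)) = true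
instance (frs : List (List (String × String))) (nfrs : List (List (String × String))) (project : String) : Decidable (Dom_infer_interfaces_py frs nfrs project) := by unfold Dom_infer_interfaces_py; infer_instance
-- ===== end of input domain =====

-- B replaces A's per-rule if-cascades by an inverted keyword→tag index scanned once,
-- with each section decoded from the collected tag list (objective: alternative decomposition).
-- Return-value equivalence only; neither program mutates its arguments.

-- ===== PORT A =====

-- shared module helper _req_text: 'req.get(k) or …' with Python truthiness ("" is falsy)
def pyOrStr (o : Option String) (next : String) : String :=
  match o with
  | some s => if s = "" then next else s
  | none => next

-- dict.get = first match in the association list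
def dictGet (req : List (String × String)) (k : String) : Option String :=
  (req.find? (fun p => p.1 == k)).map Prod.snd

def reqText (req : List (String × String)) : String :=
  pyOrStr (dictGet req "text")
    (pyOrStr (dictGet req "sentence")
      (pyOrStr (dictGet req "description") ""))

def infer_interfaces_py (frs : List (List (String × String))) (nfrs : List (List (String × String))) (project : String) : List (String × String) :=
  let all_text := PySem.Str.join " " ((frs ++ nfrs).map (fun r => PySem.Str.lower (reqText r)))
  let ui_desc := "The " ++ project ++ " system shall provide a responsive graphical user interface accessible via web browser. Interfaces include navigation, data entry forms, and feedback dialogs. Designs shall follow WCAG 2.1 AA accessibility guidelines."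
  let hw_desc := "Client hardware requires a device capable of running a modern web browser with minimum 2 GB RAM. Server hardware shall support the expected concurrent user load as defined in §5.1."
  let ifaces : List (String × String) := []
  let ifaces := ifaces ++ [("ui", ui_desc)]
  let ifaces := ifaces ++ [("hw", hw_desc)]
  let sw_parts := ["The " ++ project ++ " system interacts with the following software components:"]
  let sw_parts := if (["database", "db", "sql", "store", "record"]).any (fun k => PySem.Str.isIn k all_text) then sw_parts ++ ["• Database engine (e.g., PostgreSQL, MySQL, or MongoDB) for persistent storage."] else sw_parts
  let sw_parts := if (["email", "smtp", "notification", "alert"]).any (fun k => PySem.Str.isIn k all_text) then sw_parts ++ ["• Email service provider (e.g., SendGrid, AWS SES) for outbound notifications."] else sw_parts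
  let sw_parts := if (["api", "rest", "integration", "third-party", "external"]).any (fun k => PySem.Str.isIn k all_text) then sw_parts ++ ["• External REST APIs for third-party data or service integration."] else sw_parts
  let sw_parts := if (["payment", "billing", "transaction"]).any (fun k => PySem.Str.isIn k all_text) then sw_parts ++ ["• Payment gateway (e.g., Stripe, PayPal) for financial transactions."] else sw_parts
  let sw_parts := if sw_parts.length = 1 then sw_parts ++ ["• Standard OS libraries and runtime environment."] else sw_parts
  let ifaces := ifaces ++ [("sw", PySem.Str.join "\n    " sw_parts)]
  let comm_parts := ["Communication protocols and standards:"]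
  let comm_parts := comm_parts ++ ["• HTTPS / TLS 1.2+ for all client-server data transfer."]
  let comm_parts := if (["api", "rest", "json", "xml", "webhook"]).any (fun k => PySem.Str.isIn k all_text) then comm_parts ++ ["• RESTful JSON APIs for service-to-service communication."] else comm_parts
  let comm_parts := if (["real-time", "websocket", "live", "push", "streaming"]).any (fun k => PySem.Str.isIn k all_text) then comm_parts ++ ["• WebSocket connections for real-time data streaming."] else comm_parts
  let comm_parts := if (["email", "smtp", "notification"]).any (fun k => PySem.Str.isIn k all_text) then comm_parts ++ ["• SMTP for transactional email delivery."] else comm_parts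
  let ifaces := ifaces ++ [("comm", PySem.Str.join "\n    " comm_parts)]
  ifaces

-- ===== PORT B =====

-- inverted index: each keyword maps to the tag(s) of the rule(s) it can trigger
def keywordTags : List (String × List String) :=
  [ ("database", ["db"]), ("db", ["db"]), ("sql", ["db"]), ("store", ["db"]), ("record", ["db"]),
    ("email", ["mail", "smtp"]), ("smtp", ["mail", "smtp"]), ("notification", ["mail", "smtp"]),
    ("alert", ["mail"]),
    ("api", ["ext", "json"]), ("rest", ["ext", "json"]),
    ("integration", ["ext"]), ("third-party", ["ext"]), ("external", ["ext"]),
    ("payment", ["pay"]), ("billing", ["pay"]), ("transaction", ["pay"]),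
    ("json", ["json"]), ("xml", ["json"]), ("webhook", ["json"]),
    ("real-time", ["ws"]), ("websocket", ["ws"]), ("live", ["ws"]), ("push", ["ws"]), ("streaming", ["ws"]) ]

def swLines : List (String × String) :=
  [ ("db", "• Database engine (e.g., PostgreSQL, MySQL, or MongoDB) for persistent storage."),
    ("mail", "• Email service provider (e.g., SendGrid, AWS SES) for outbound notifications."),
    ("ext", "• External REST APIs for third-party data or service integration."),
    ("pay", "• Payment gateway (e.g., Stripe, PayPal) for financial transactions.") ]

def commLines : List (String × String) :=
  [ ("json", "• RESTful JSON APIs for service-to-service communication."),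
    ("ws", "• WebSocket connections for real-time data streaming."),
    ("smtp", "• SMTP for transactional email delivery.") ]

def infer_interfaces_py_alt (frs : List (List (String × String))) (nfrs : List (List (String × String))) (project : String) : List (String × String) :=
  let all_text := PySem.Str.join " " ((frs ++ nfrs).map (fun r => PySem.Str.lower (reqText r)))
  -- [t for kw, ts in _KEYWORD_TAGS if kw in all_text for t in ts]
  let tags := (keywordTags.filter (fun p => PySem.Str.isIn p.1 all_text)).flatMap Prod.snd
  let sw0 := (swLines.filter (fun p => tags.contains p.1)).map Prod.snd
  let sw_lines := if sw0 = [] then ["• Standard OS libraries and runtime environment."] else sw0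
  [ ("ui", "The " ++ project ++ " system shall provide a responsive graphical user interface accessible via web browser. Interfaces include navigation, data entry forms, and feedback dialogs. Designs shall follow WCAG 2.1 AA accessibility guidelines."),
    ("hw", "Client hardware requires a device capable of running a modern web browser with minimum 2 GB RAM. Server hardware shall support the expected concurrent user load as defined in §5.1."),
    ("sw", PySem.Str.join "\n    " (("The " ++ project ++ " system interacts with the following software components:") :: sw_lines)),
    ("comm", PySem.Str.join "\n    " (["Communication protocols and standards:", "• HTTPS / TLS 1.2+ for all client-server data transfer."] ++ ((commLines.filter (fun p => tags.contains p.1)).map Prod.snd))) ]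

-- ===== PRECONDITION & SPEC =====
def Spec_infer_interfaces_py (frs : List (List (String × String))) (nfrs : List (List (String × String))) (project : String) (out : List (String × String)) : Prop := out = infer_interfaces_py_alt frs nfrs project
instance (frs : List (List (String × String))) (nfrs : List (List (String × String))) (project : String) (out : List (String × String)) : Decidable (Spec_infer_interfaces_py frs nfrs project out) := by unfold Spec_infer_interfaces_py; infer_instance

-- ===== CLAIM =====
def Claim_equal_infer_interfaces_py : Prop := ∀ (frs : List (List (String × String))) (nfrs : List (List (String × String))) (project : String), Dom_infer_interfaces_py frs nfrs project → Spec_infer_interfaces_py frs nfrs project (infer_interfaces_py frs nfrs project)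

-- ===== LEMMAS AND PROOFS =====

-- membership in the flattened tag list of the matched index rows
theorem contains_tags (table : List (String × List String)) (text t : String) :
    ((table.filter (fun p => PySem.Str.isIn p.1 text)).flatMap Prod.snd).contains t
      = table.any (fun p => PySem.Str.isIn p.1 text && p.2.contains t) := by
  induction table with
  | nil => simp
  | cons p tl ih =>
    simp only [PySem.Str.isIn, List.contains_eq_mem] at ih ⊢
    rw [List.filter_cons]
    by_cases h : PySem.Chars.isIn p.1.toList text.toList = true
    · rw [if_pos h, List.any_cons, h, List.flatMap_cons]
      by_cases ht : t ∈ p.2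
      · simp [ht]
      · rw [← ih]
        simp [List.mem_append, ht]
    · rw [if_neg h, List.any_cons]
      simp only [Bool.not_eq_true] at h
      simp [h, ih]

-- each tag is triggered exactly by its rule's keyword group
theorem tag_db (text : String) :
    keywordTags.any (fun p => PySem.Str.isIn p.1 text && p.2.contains "db")
      = (["database", "db", "sql", "store", "record"]).any (fun k => PySem.Str.isIn k text) := by
  simp [keywordTags]

theorem tag_mail (text : String) :
    keywordTags.any (fun p => PySem.Str.isIn p.1 text && p.2.contains "mail")
      = (["email", "smtp", "notification", "alert"]).any (fun k => PySem.Str.isIn k text) := by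
  simp [keywordTags]

theorem tag_ext (text : String) :
    keywordTags.any (fun p => PySem.Str.isIn p.1 text && p.2.contains "ext")
      = (["api", "rest", "integration", "third-party", "external"]).any (fun k => PySem.Str.isIn k text) := by
  simp [keywordTags]

theorem tag_pay (text : String) :
    keywordTags.any (fun p => PySem.Str.isIn p.1 text && p.2.contains "pay")
      = (["payment", "billing", "transaction"]).any (fun k => PySem.Str.isIn k text) := by
  simp [keywordTags]

theorem tag_json (text : String) :
    keywordTags.any (fun p => PySem.Str.isIn p.1 text && p.2.contains "json")
      = (["api", "rest", "json", "xml", "webhook"]).any (fun k => PySem.Str.isIn k text) := by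
  simp [keywordTags]

theorem tag_ws (text : String) :
    keywordTags.any (fun p => PySem.Str.isIn p.1 text && p.2.contains "ws")
      = (["real-time", "websocket", "live", "push", "streaming"]).any (fun k => PySem.Str.isIn k text) := by
  simp [keywordTags]

theorem tag_smtp (text : String) :
    keywordTags.any (fun p => PySem.Str.isIn p.1 text && p.2.contains "smtp")
      = (["email", "smtp", "notification"]).any (fun k => PySem.Str.isIn k text) := by
  simp [keywordTags]

-- ===== VERDICT =====
theorem infer_interfaces_py_spec : Claim_equal_infer_interfaces_py := by
  intro frs nfrs project _
  unfold Spec_infer_interfaces_py infer_interfaces_py infer_interfaces_py_alt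
  dsimp only
  simp only [swLines, commLines, List.filter_cons, List.filter_nil,
    contains_tags, tag_db, tag_mail, tag_ext, tag_pay, tag_json, tag_ws, tag_smtp]
  cases h1 : (["database", "db", "sql", "store", "record"]).any (fun k => PySem.Str.isIn k (PySem.Str.join " " (List.map (fun r => PySem.Str.lower (reqText r)) (frs ++ nfrs)))) <;>
  cases h2 : (["email", "smtp", "notification", "alert"]).any (fun k => PySem.Str.isIn k (PySem.Str.join " " (List.map (fun r => PySem.Str.lower (reqText r)) (frs ++ nfrs)))) <;>
  cases h3 : (["api", "rest", "integration", "third-party", "external"]).any (fun k => PySem.Str.isIn k (PySem.Str.join " " (List.map (fun r => PySem.Str.lower (reqText r)) (frs ++ nfrs)))) <;>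
  cases h4 : (["payment", "billing", "transaction"]).any (fun k => PySem.Str.isIn k (PySem.Str.join " " (List.map (fun r => PySem.Str.lower (reqText r)) (frs ++ nfrs)))) <;>
  cases h5 : (["api", "rest", "json", "xml", "webhook"]).any (fun k => PySem.Str.isIn k (PySem.Str.join " " (List.map (fun r => PySem.Str.lower (reqText r)) (frs ++ nfrs)))) <;>
  cases h6 : (["real-time", "websocket", "live", "push", "streaming"]).any (fun k => PySem.Str.isIn k (PySem.Str.join " " (List.map (fun r => PySem.Str.lower (reqText r)) (frs ++ nfrs)))) <;>
  cases h7 : (["email", "smtp", "notification"]).any (fun k => PySem.Str.isIn k (PySem.Str.join " " (List.map (fun r => PySem.Str.lower (reqText r)) (frs ++ nfrs)))) <;>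
  simp
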